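-- pv_equiv track=rewrite | github.com/divyanshu25/VibeNanoChat | src/eval_tasks/core/token_batching.py | find_common_length
-- ===== SOURCE A (Python) =====
-- from typing import List, Tuple
--
-- def find_common_length(
--     token_sequences: List[List[int]], direction: str = "left"
-- ) -> int:
--     """
--     Find the length of the common prefix or suffix across token sequences.
--
--     Used to identify:
--     - Common prefix in multiple choice (same context, different continuations)
--     - Common suffix in schema tasks (different contexts, same continuation)
--
--     Args:
--         token_sequences: List of token ID sequences to compare
--         direction: 'left' for prefix, 'right' for suffix
--
--     Returns:
--         Number of tokens in the common prefix/suffix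
--     """
--     min_len = min(len(seq) for seq in token_sequences)
--     indices = {"left": range(min_len), "right": range(-1, -min_len - 1, -1)}[direction]
--
--     # Find the first position where the token sequences differ
--     for i, idx in enumerate(indices):
--         token = token_sequences[0][idx]
--         if not all(seq[idx] == token for seq in token_sequences):
--             return i
--     return min_len
-- ===== SOURCE B (Python) =====
-- from typing import List
--
--
-- def find_common_length(
--     token_sequences: List[List[int]], direction: str = "left"
-- ) -> int:
--     # Reduce the suffix case to the prefix case by reversing every sequence,
--     # then take the minimum over all sequences of the first position where a
--     # sequence diverges from the first one (zip caps at either length).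
--     seqs = {
--         "left": token_sequences,
--         "right": [s[::-1] for s in token_sequences],
--     }[direction]
--     ref = seqs[0]
--
--     def first_diff(seq):
--         n = 0
--         for a, b in zip(ref, seq):
--             if a != b:
--                 break
--             n += 1
--         return n
--
--     return min(first_diff(s) for s in seqs)
-- ===== Notes on version B (the rewrite author's own statement) =====
-- stated objective: alternative
-- what changed: A walks direction-dependent index positions outermost and tests all() sequences at each position; B instead reduces the suffix case to the prefix case by reversing every sequence, computes each sequence's zip-based first divergence from the first sequence, and returns the minimum of those divergences.
import Mathlib
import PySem

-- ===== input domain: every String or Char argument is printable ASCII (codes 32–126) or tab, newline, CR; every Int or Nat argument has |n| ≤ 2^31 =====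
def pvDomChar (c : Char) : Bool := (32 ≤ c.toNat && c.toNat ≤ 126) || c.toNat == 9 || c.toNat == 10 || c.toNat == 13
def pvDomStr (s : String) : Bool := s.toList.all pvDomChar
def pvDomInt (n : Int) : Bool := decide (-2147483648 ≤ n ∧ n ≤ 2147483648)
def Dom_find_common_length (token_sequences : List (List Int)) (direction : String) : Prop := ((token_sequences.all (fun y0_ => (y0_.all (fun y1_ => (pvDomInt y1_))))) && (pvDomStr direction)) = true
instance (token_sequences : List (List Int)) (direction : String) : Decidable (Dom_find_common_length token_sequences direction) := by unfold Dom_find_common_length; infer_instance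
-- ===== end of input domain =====

-- B reduces the suffix case to the prefix case by reversing every sequence, then takes the
-- minimum over all sequences of the zip-based first-divergence from the first one; same cost
-- class as A's indexed position-outer scan, no speed claim.

-- ===== PORT A =====
-- seq[idx] (Pre_ guarantees the index is in range on A's admitted runs, so getD 0 is never taken)
def pyAt (s : List Int) (idx : Int) : Int := (PySem.List.pyGet? s idx).getD 0

-- the `for i, idx in enumerate(indices)` loop of A
def fclA_loop (seqs : List (List Int)) (idxs : List Int) (i : Int) (min_len : Int) : Int :=
  match idxs with
  | [] => min_len
  | idx :: rest =>
    let token := pyAt ((PySem.List.pyGet? seqs 0).getD []) idx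
    if seqs.all (fun seq => pyAt seq idx == token) then fclA_loop seqs rest (i + 1) min_len
    else i

def find_common_length (token_sequences : List (List Int)) (direction : String) : Int :=
  let min_len := (PySem.List.min? (token_sequences.map (fun seq => (seq.length : Int))) (fun x => x)).getD 0
  -- the dict lookup: "left" / "right"; any other key raises KeyError (outside Pre_), ported as the "right" branch
  let indices := if direction == "left" then PySem.List.pyRange 0 min_len 1
                 else PySem.List.pyRange (-1) (-min_len - 1) (-1)
  fclA_loop token_sequences indices 0 min_len

-- ===== PORT B =====
-- B's first_diff: `n = 0; for a, b in zip(ref, seq): if a != b: break; n += 1; return n`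
def fdiff : List Int → List Int → Int
  | a :: r, b :: s => if a ≠ b then 0 else fdiff r s + 1
  | _, _ => 0

def find_common_length_alt (token_sequences : List (List Int)) (direction : String) : Int :=
  -- B's dict lookup {"left": …, "right": …}[direction]: KeyError outside Pre_, ported as the branch
  let seqs := if direction == "right" then token_sequences.map List.reverse else token_sequences
  let ref := (PySem.List.pyGet? seqs 0).getD []
  (PySem.List.min? (seqs.map (fun s => fdiff ref s)) (fun x => x)).getD 0

-- ===== PRECONDITION & SPEC =====
-- Pre_ excludes the empty list (min() raises ValueError in both A and B) and any direction other
-- than "left"/"right" (A's dict lookup raises KeyError).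
def Pre_find_common_length (token_sequences : List (List Int)) (direction : String) : Prop :=
  token_sequences ≠ [] ∧ (direction = "left" ∨ direction = "right")
instance (token_sequences : List (List Int)) (direction : String) : Decidable (Pre_find_common_length token_sequences direction) := by unfold Pre_find_common_length; infer_instance

def pvWitness_find_common_length : List (List Int) × String := ([[1, 2], [1, 3, 4]], "left")

def Spec_find_common_length (token_sequences : List (List Int)) (direction : String) (out : Int) : Prop := out = find_common_length_alt token_sequences direction
instance (token_sequences : List (List Int)) (direction : String) (out : Int) : Decidable (Spec_find_common_length token_sequences direction out) := by unfold Spec_find_common_length; infer_instance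

-- ===== CLAIM (what is proved, stated in full; the proofs are below) =====
def Claim_equal_find_common_length : Prop := ∀ (token_sequences : List (List Int)) (direction : String), Dom_find_common_length token_sequences direction → Pre_find_common_length token_sequences direction → Spec_find_common_length token_sequences direction (find_common_length token_sequences direction)

-- ===== LEMMAS AND PROOFS =====

-- first position (0-based) in idxs where seq differs from ref (via pyAt); idxs.length if none
def pvDiv (ref seq : List Int) : List Int → Int
  | [] => 0
  | idx :: rest => if pyAt seq idx = pyAt ref idx then pvDiv ref seq rest + 1 else 0

-- minimum of pvDiv over the remaining sequences, with a given initial value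
def pvMin (ref : List Int) (rest : List (List Int)) (idxs : List Int) : Int :=
  rest.foldr (fun s m => min (pvDiv ref s idxs) m) (idxs.length : Int)

lemma pvDiv_nonneg (ref seq : List Int) (idxs : List Int) : 0 ≤ pvDiv ref seq idxs := by
  induction idxs with
  | nil => simp [pvDiv]
  | cons idx rest ih => simp only [pvDiv]; split <;> omega

lemma pvMin_nonneg (ref : List Int) (rest : List (List Int)) (idxs : List Int) : 0 ≤ pvMin ref rest idxs := by
  induction rest with
  | nil => simp [pvMin]
  | cons s t ih =>
    have := pvDiv_nonneg ref s idxs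
    simp only [pvMin, List.foldr_cons] at *
    omega

lemma pvMin_le_of_mem (ref : List Int) {rest : List (List Int)} {s : List Int} (hs : s ∈ rest) (idxs : List Int) :
    pvMin ref rest idxs ≤ pvDiv ref s idxs := by
  induction rest with
  | nil => cases hs
  | cons x t ih =>
    simp only [pvMin, List.foldr_cons] at *
    rcases List.mem_cons.mp hs with h | h
    · subst h; omega
    · have := ih h; omega

lemma pvMin_cons_of_all (ref : List Int) (rest : List (List Int)) (idx : Int) (idxs : List Int)
    (h : ∀ s ∈ rest, pyAt s idx = pyAt ref idx) :
    pvMin ref rest (idx :: idxs) = pvMin ref rest idxs + 1 := by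
  induction rest with
  | nil => simp [pvMin]
  | cons s t ih =>
    have hs := h s (List.mem_cons_self)
    have ht := ih (fun x hx => h x (List.mem_cons_of_mem _ hx))
    simp only [pvMin, List.foldr_cons] at *
    rw [ht]
    simp only [pvDiv, hs, if_pos]
    omega

-- A's loop returns (start index) + (min divergence) when some sequence diverges, else min_len
lemma fclA_loop_eq (ref : List Int) (rest : List (List Int)) (idxs : List Int) :
    ∀ (i ml : Int), fclA_loop (ref :: rest) idxs i ml =
      if pvMin ref rest idxs < (idxs.length : Int) then i + pvMin ref rest idxs else ml := by
  induction idxs with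
  | nil =>
    intro i ml
    have h0 := pvMin_nonneg ref rest []
    simp only [fclA_loop]
    rw [if_neg (by simp only [List.length_nil, Nat.cast_zero]; omega)]
  | cons idx rest' ih =>
    intro i ml
    simp only [fclA_loop, PySem.List.pyGet?_zero_cons, Option.getD_some]
    by_cases hall : ∀ s ∈ rest, pyAt s idx = pyAt ref idx
    · have hcond : (ref :: rest).all (fun seq => pyAt seq idx == pyAt ref idx) = true := by
        simp only [List.all_eq_true]
        intro s hs
        rcases List.mem_cons.mp hs with h | h
        · subst h; simp
        · simp [hall s h]
      rw [if_pos hcond, ih]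
      rw [pvMin_cons_of_all ref rest idx rest' hall]
      simp only [List.length_cons]
      push_cast
      split_ifs <;> omega
    · push Not at hall
      obtain ⟨s, hs, hne⟩ := hall
      have hcond : (ref :: rest).all (fun seq => pyAt seq idx == pyAt ref idx) = false := by
        simp only [List.all_eq_false]
        exact ⟨s, List.mem_cons_of_mem _ hs, by simp [hne]⟩
      rw [if_neg (by simp [hcond])]
      have h0 : pvDiv ref s (idx :: rest') = 0 := by simp [pvDiv, hne]
      have h1 := pvMin_le_of_mem ref hs (idx :: rest')
      have h2 := pvMin_nonneg ref rest (idx :: rest')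
      have h3 : pvMin ref rest (idx :: rest') = 0 := by omega
      rw [h3]
      simp only [List.length_cons]
      push_cast
      split_ifs <;> omega

-- ---- facts about B's fdiff ----

lemma fdiff_nonneg (r s : List Int) : 0 ≤ fdiff r s := by
  induction r generalizing s with
  | nil => simp [fdiff]
  | cons a r ih =>
    cases s with
    | nil => simp [fdiff]
    | cons b s => simp only [fdiff]; have := ih s; split <;> omega

lemma fdiff_le_right (r s : List Int) : fdiff r s ≤ (s.length : Int) := by
  induction r generalizing s with
  | nil => simp [fdiff]
  | cons a r ih =>
    cases s with
    | nil => simp [fdiff]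
    | cons b s =>
      simp only [fdiff, List.length_cons]
      have := ih s
      split <;> push_cast <;> omega

lemma fdiff_self (r : List Int) : fdiff r r = (r.length : Int) := by
  induction r with
  | nil => simp [fdiff]
  | cons a r ih => simp [fdiff, ih]

-- ---- pvDiv over the index ranges = capped fdiff ----

-- generalized left lemma, by induction on the remaining range
lemma pvDiv_range_drop (ref s : List Int) (m : Int) (hm1 : m ≤ (ref.length : Int)) (hm2 : m ≤ (s.length : Int)) :
    ∀ (k : Int), 0 ≤ k → k ≤ m →
      pvDiv ref s (PySem.List.pyRange k m 1) = min (fdiff (ref.drop k.toNat) (s.drop k.toNat)) (m - k) := by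
  intro k
  induction hn : (m - k).toNat generalizing k with
  | zero =>
    intro hk0 hkm
    have hkm' : k = m := by omega
    subst hkm'
    rw [PySem.List.pyRange_one_eq_nil le_rfl]
    have := fdiff_nonneg (ref.drop k.toNat) (s.drop k.toNat)
    simp only [pvDiv]
    omega
  | succ n ih =>
    intro hk0 hkm
    have hkm' : k < m := by omega
    rw [PySem.List.pyRange_one_cons hkm']
    have hkr : k.toNat < ref.length := by omega
    have hks : k.toNat < s.length := by omega
    have hdr : ref.drop k.toNat = ref[k.toNat] :: ref.drop (k.toNat + 1) := List.drop_eq_getElem_cons hkr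
    have hds : s.drop k.toNat = s[k.toNat] :: s.drop (k.toNat + 1) := List.drop_eq_getElem_cons hks
    have hpr : pyAt ref k = ref[k.toNat] := by
      simp [pyAt, PySem.List.pyGet?_of_nonneg _ hk0, List.getElem?_eq_getElem hkr]
    have hps : pyAt s k = s[k.toNat] := by
      simp [pyAt, PySem.List.pyGet?_of_nonneg _ hk0, List.getElem?_eq_getElem hks]
    have hk1 : (k + 1).toNat = k.toNat + 1 := by omega
    simp only [pvDiv, hpr, hps, hdr, hds, fdiff]
    by_cases heq : s[k.toNat] = ref[k.toNat]
    · rw [if_pos heq, ih (k + 1) (by omega) (by omega) (by omega)]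
      rw [hk1]
      have := fdiff_nonneg (ref.drop (k.toNat + 1)) (s.drop (k.toNat + 1))
      rw [if_neg (by simp [heq])]
      omega
    · rw [if_neg heq, if_pos (by simp; exact fun h => heq h.symm)]
      omega

lemma pvDiv_range_left (ref s : List Int) (m : Int) (hm0 : 0 ≤ m)
    (hm1 : m ≤ (ref.length : Int)) (hm2 : m ≤ (s.length : Int)) :
    pvDiv ref s (PySem.List.pyRange 0 m 1) = min (fdiff ref s) m := by
  have := pvDiv_range_drop ref s m hm1 hm2 0 le_rfl hm0
  simpa using this

-- negative indices read the reversed lists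
lemma pyAt_neg (s : List Int) (k : Int) (hk0 : 0 ≤ k) (hk : k < (s.length : Int)) :
    pyAt s (-1 - k) = pyAt s.reverse k := by
  have h1 : (-1 - k) = -((k.toNat + 1 : Nat) : Int) := by push_cast; omega
  rw [pyAt, pyAt, h1,
    PySem.List.pyGet?_neg_natCast s (k.toNat + 1) (by omega) (by omega),
    PySem.List.pyGet?_of_nonneg _ hk0]
  have hkn : k.toNat < s.length := by omega
  have hk' : k.toNat < s.reverse.length := by simpa using hkn
  rw [List.getElem?_eq_getElem (by omega), List.getElem?_eq_getElem hk']
  simp [List.getElem_reverse]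
  congr 1
  omega

lemma pvDiv_map_neg (ref s : List Int) (l : List Int) (h0 : ∀ i ∈ l, 0 ≤ i)
    (hr : ∀ i ∈ l, i < (ref.length : Int)) (hs : ∀ i ∈ l, i < (s.length : Int)) :
    pvDiv ref s (l.map (fun k => -1 - k)) = pvDiv ref.reverse s.reverse l := by
  induction l with
  | nil => simp [pvDiv]
  | cons k t ih =>
    simp only [List.map_cons, pvDiv]
    rw [pyAt_neg ref k (h0 k (by simp)) (hr k (by simp)),
      pyAt_neg s k (h0 k (by simp)) (hs k (by simp)),
      ih (fun i hi => h0 i (by simp [hi])) (fun i hi => hr i (by simp [hi]))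
        (fun i hi => hs i (by simp [hi]))]

lemma pvDiv_range_right (ref s : List Int) (m : Int) (hm0 : 0 ≤ m)
    (hm1 : m ≤ (ref.length : Int)) (hm2 : m ≤ (s.length : Int)) :
    pvDiv ref s (PySem.List.pyRange (-1) (-m - 1) (-1)) = min (fdiff ref.reverse s.reverse) m := by
  have hrange : PySem.List.pyRange (-1) (-m - 1) (-1) =
      (PySem.List.pyRange 0 m 1).map (fun k => -1 - k) := by
    rw [PySem.List.pyRange_neg_one, PySem.List.pyRange_one, List.map_map]
    have ht : (-1 - (-m - 1)).toNat = (m - 0).toNat := by omega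
    rw [ht]
    exact List.map_congr_left (fun k _ => by simp)
  rw [hrange, pvDiv_map_neg ref s _
    (fun i hi => (PySem.List.mem_pyRange_one.mp hi).1)
    (fun i hi => by have := (PySem.List.mem_pyRange_one.mp hi).2; omega)
    (fun i hi => by have := (PySem.List.mem_pyRange_one.mp hi).2; omega)]
  exact pvDiv_range_left ref.reverse s.reverse m hm0 (by simpa using hm1) (by simpa using hm2)

-- ---- foldl-min toolkit ----

lemma foldl_min_le_init (l : List Int) : ∀ a : Int, l.foldl min a ≤ a := by
  induction l with
  | nil => intro a; simp
  | cons x t ih => intro a; simp only [List.foldl_cons]; have := ih (min a x); omega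

lemma foldl_min_le_mem {l : List Int} {x : Int} (hx : x ∈ l) : ∀ a : Int, l.foldl min a ≤ x := by
  induction l with
  | nil => cases hx
  | cons y t ih =>
    intro a
    rcases List.mem_cons.mp hx with h | h
    · subst h; have := foldl_min_le_init t (min a x); simp only [List.foldl_cons]; omega
    · exact ih h _
lemma le_foldl_min {l : List Int} {c : Int} (hl : ∀ x ∈ l, c ≤ x) : ∀ a : Int, c ≤ a → c ≤ l.foldl min a := by
  induction l with
  | nil => intro a ha; simpa using ha
  | cons x t ih =>
    intro a ha
    simp only [List.foldl_cons]
    exact ih (fun y hy => hl y (by simp [hy])) _ (by have := hl x (by simp); omega)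

-- a foldr of (min of an image) is a foldl min over the mapped list
lemma foldl_min_comm (l : List Int) : ∀ a b : Int, l.foldl min (min a b) = min a (l.foldl min b) := by
  induction l with
  | nil => intro a b; simp
  | cons x t ih =>
    intro a b
    simp only [List.foldl_cons]
    have h : min (min a b) x = min a (min b x) := by omega
    rw [h, ih]

lemma foldr_min_eq_foldl {α : Type} (f : α → Int) (l : List α) : ∀ i : Int,
    l.foldr (fun x m => min (f x) m) i = (l.map f).foldl min i := by
  induction l with
  | nil => intro i; simp
  | cons x t ih =>
    intro i
    simp only [List.foldr_cons, List.map_cons, List.foldl_cons, ih]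
    have h : min i (f x) = min (f x) i := by omega
    rw [h, ← foldl_min_comm]

-- the arithmetic heart: capping each divergence at ml (the min length) and starting from ml
-- gives the same minimum as the uncapped divergences started from the reference length
lemma capped_min_eq (ps : List (Int × Int)) (L ml : Int)
    (hps : ∀ p ∈ ps, 0 ≤ p.1 ∧ p.1 ≤ p.2)
    (hml : ml = (ps.map Prod.snd).foldl min L) :
    (ps.map (fun p => min p.1 ml)).foldl min ml = (ps.map Prod.fst).foldl min L := by
  have hmlL : ml ≤ L := by rw [hml]; exact foldl_min_le_init _ L
  apply le_antisymm
  · -- X ≤ Y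
    refine le_foldl_min ?_ L (le_trans (foldl_min_le_init _ ml) hmlL)
    intro x hx
    obtain ⟨p, hp, rfl⟩ := List.mem_map.mp hx
    have hc : min p.1 ml ∈ ps.map (fun p => min p.1 ml) := List.mem_map.mpr ⟨p, hp, rfl⟩
    have := foldl_min_le_mem hc ml
    omega
  · -- Y ≤ X
    have hYml : (ps.map Prod.fst).foldl min L ≤ ml := by
      rw [hml]
      refine le_foldl_min ?_ L (foldl_min_le_init _ L)
      intro x hx
      obtain ⟨p, hp, rfl⟩ := List.mem_map.mp hx
      have h1 : p.1 ∈ ps.map Prod.fst := List.mem_map.mpr ⟨p, hp, rfl⟩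
      have := foldl_min_le_mem h1 L
      have := (hps p hp).2
      omega
    refine le_foldl_min ?_ ml hYml
    intro x hx
    obtain ⟨p, hp, rfl⟩ := List.mem_map.mp hx
    have h1 : p.1 ∈ ps.map Prod.fst := List.mem_map.mpr ⟨p, hp, rfl⟩
    have := foldl_min_le_mem h1 L
    omega

-- pvMin with pointwise-rewritten pvDiv
lemma pvMin_congr (ref : List Int) (rest : List (List Int)) (idxs : List Int)
    (f : List Int → Int) (h : ∀ s ∈ rest, pvDiv ref s idxs = f s) :
    pvMin ref rest idxs = rest.foldr (fun s m => min (f s) m) (idxs.length : Int) := by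
  induction rest with
  | nil => rfl
  | cons s t ih =>
    simp only [pvMin, List.foldr_cons] at *
    rw [h s (by simp), ih (fun x hx => h x (by simp [hx]))]

-- ===== VERDICT (by name: the statement is the Claim_ definition above) =====
theorem find_common_length_spec : Claim_equal_find_common_length := by
  intro ts dir _ hpre
  obtain ⟨hne, hdir⟩ := hpre
  unfold Spec_find_common_length find_common_length find_common_length_alt
  cases ts with
  | nil => exact absurd rfl hne
  | cons ref rest =>
    simp only [List.map_cons, PySem.List.min?_id_cons, Option.getD_some]
    set ml := (rest.map (fun seq => (seq.length : Int))).foldl min (ref.length : Int) with hml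
    have hml_le : ml ≤ (ref.length : Int) := by rw [hml]; exact foldl_min_le_init _ _
    have hml_mem : ∀ s ∈ rest, ml ≤ (s.length : Int) := by
      intro s hs
      rw [hml]; exact foldl_min_le_mem (List.mem_map.mpr ⟨s, hs, rfl⟩) _
    have hml0 : 0 ≤ ml := by
      rw [hml]
      exact le_foldl_min (fun x hx => by obtain ⟨s, _, rfl⟩ := List.mem_map.mp hx; positivity)
        (ref.length : Int) (by positivity)
    set idxs := if dir == "left" then PySem.List.pyRange 0 ml 1
                else PySem.List.pyRange (-1) (-ml - 1) (-1) with hidxs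
    have hlen : ((idxs.length : Nat) : Int) = ml := by
      rw [hidxs]
      rcases hdir with h | h <;> subst h <;>
        simp [PySem.List.length_pyRange_one, PySem.List.length_pyRange_neg_one] <;> omega
    rw [fclA_loop_eq]
    -- B's side: the processed sequences and their fdiffs
    rcases hdir with h | h
    · -- direction = "left"
      subst h
      have hb2 : (("left" : String) == "right") = false := rfl
      simp only [hb2, Bool.false_eq_true, if_false, PySem.List.pyGet?_zero_cons,
        Option.getD_some, List.map_cons, PySem.List.min?_id_cons]
      have hcap : ∀ s ∈ rest, pvDiv ref s idxs = min (fdiff ref s) ml := by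
        intro s hs
        rw [hidxs]
        simpa using pvDiv_range_left ref s ml hml0 hml_le (hml_mem s hs)
      have hA : pvMin ref rest idxs = (rest.map (fun s => min (fdiff ref s) ml)).foldl min ml := by
        rw [pvMin_congr ref rest idxs _ hcap, foldr_min_eq_foldl, hlen]
      have hkey := capped_min_eq (rest.map (fun s => (fdiff ref s, (s.length : Int))))
        (ref.length : Int) ml
        (by
          intro p hp
          obtain ⟨s, hs, rfl⟩ := List.mem_map.mp hp
          exact ⟨fdiff_nonneg ref s, fdiff_le_right ref s⟩)
        (by rw [hml]; congr 1; simp)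
      simp only [List.map_map] at hkey
      have hkey' : (rest.map (fun s => min (fdiff ref s) ml)).foldl min ml =
          (rest.map (fun s => fdiff ref s)).foldl min (ref.length : Int) := by
        simpa using hkey
      rw [hA, hkey', fdiff_self, hlen]
      have hAle : (rest.map (fun s => min (fdiff ref s) ml)).foldl min ml ≤ ml :=
        foldl_min_le_init _ _
      rw [hkey'] at hAle
      split_ifs with hlt <;> omega
    · -- direction = "right"
      subst h
      have hb2 : (("right" : String) == "right") = true := rfl
      simp only [hb2, if_true, List.map_cons, List.map_map,
        Function.comp_def, PySem.List.pyGet?_zero_cons, Option.getD_some, PySem.List.min?_id_cons]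
      have hcap : ∀ s ∈ rest, pvDiv ref s idxs = min (fdiff ref.reverse s.reverse) ml := by
        intro s hs
        rw [hidxs]
        simpa using pvDiv_range_right ref s ml hml0 hml_le (hml_mem s hs)
      have hA : pvMin ref rest idxs =
          (rest.map (fun s => min (fdiff ref.reverse s.reverse) ml)).foldl min ml := by
        rw [pvMin_congr ref rest idxs _ hcap, foldr_min_eq_foldl, hlen]
      have hkey := capped_min_eq (rest.map (fun s => (fdiff ref.reverse s.reverse, (s.length : Int))))
        (ref.length : Int) ml
        (by
          intro p hp
          obtain ⟨s, hs, rfl⟩ := List.mem_map.mp hp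
          refine ⟨fdiff_nonneg _ _, ?_⟩
          have := fdiff_le_right ref.reverse s.reverse
          simpa using this)
        (by rw [hml]; congr 1; simp)
      simp only [List.map_map] at hkey
      have hkey' : (rest.map (fun s => min (fdiff ref.reverse s.reverse) ml)).foldl min ml =
          (rest.map (fun s => fdiff ref.reverse s.reverse)).foldl min (ref.length : Int) := by
        simpa using hkey
      have hself : fdiff ref.reverse ref.reverse = (ref.length : Int) := by
        rw [fdiff_self]; simp
      rw [hA, hkey', hself, hlen]
      have hAle : (rest.map (fun s => min (fdiff ref.reverse s.reverse) ml)).foldl min ml ≤ ml :=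
        foldl_min_le_init _ _
      rw [hkey'] at hAle
      split_ifs with hlt <;> omega
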